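-- pv_equiv track=rewrite | github.com/dmitry957/codewars-training | kata/6-kyu/simple-fun-250/solution.py | prefix_sums_to_suffix_sums
-- ===== SOURCE A (Python) =====
-- def prefix_sums_to_suffix_sums(prefix_sums):
--     arr = [prefix_sums[0]]
--     for i in range(len(prefix_sums) - 1):
--         arr.append(prefix_sums[i + 1] - prefix_sums[i])
--     suffix_sums = []
--     total = 0
--     for x in reversed(arr):
--         total += x
--         suffix_sums.append(total)
--     return suffix_sums[::-1]
-- ===== SOURCE B (Python) =====
-- def prefix_sums_to_suffix_sums(prefix_sums):
--     total = prefix_sums[-1]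
--     return [total] + [total - x for x in prefix_sums[:-1]]
-- ===== Notes on version B (the rewrite author's own statement) =====
-- stated objective: simpler
-- what changed: B uses the closed form first element = total, element i = total - prefix(i-1) in one forward pass, instead of A's reconstruct-diffs / reversed-accumulate / reverse pipeline.
import Mathlib
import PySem

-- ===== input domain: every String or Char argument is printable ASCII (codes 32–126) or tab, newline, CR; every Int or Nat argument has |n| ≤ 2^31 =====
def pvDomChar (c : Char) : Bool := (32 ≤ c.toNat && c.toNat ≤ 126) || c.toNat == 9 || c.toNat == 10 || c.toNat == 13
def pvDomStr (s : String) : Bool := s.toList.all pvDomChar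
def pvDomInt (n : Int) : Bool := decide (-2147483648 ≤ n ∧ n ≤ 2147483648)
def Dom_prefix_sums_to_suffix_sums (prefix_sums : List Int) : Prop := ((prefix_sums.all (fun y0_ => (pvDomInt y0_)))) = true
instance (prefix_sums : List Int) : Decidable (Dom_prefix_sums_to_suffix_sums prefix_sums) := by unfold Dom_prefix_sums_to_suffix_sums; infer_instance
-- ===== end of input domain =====

-- B replaces A's reconstruct-diffs / reversed-accumulate / reverse pipeline with the
-- closed form first element = total, element i = total - prefix(i-1) in one forward pass (simpler).

-- ===== PORT A =====
-- arr = [prefix_sums[0]]; for i in range(len-1): arr.append(prefix_sums[i+1]-prefix_sums[i])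
-- then total-accumulate over reversed(arr), then [::-1].
def prefix_sums_to_suffix_sums (prefix_sums : List Int) : List Int :=
  match prefix_sums with
  | [] => []   -- Python raises IndexError here (prefix_sums[0]); excluded by Pre_
  | h :: _ =>
    let arr := (List.range (prefix_sums.length - 1)).foldl
      (fun acc i => acc ++ [prefix_sums.getD (i + 1) 0 - prefix_sums.getD i 0]) [h]
    let st := arr.reverse.foldl
      (fun (st : Int × List Int) x => (st.1 + x, st.2 ++ [st.1 + x])) (0, [])
    st.2.reverse

-- ===== PORT B =====
-- total = prefix_sums[-1]; [total] + [total - x for x in prefix_sums[:-1]]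
def prefix_sums_to_suffix_sums_alt (prefix_sums : List Int) : List Int :=
  match prefix_sums.getLast? with
  | none => []   -- Python raises IndexError here (prefix_sums[-1]); excluded by Pre_
  | some total => total :: prefix_sums.dropLast.map (fun x => total - x)

-- ===== PRECONDITION & SPEC =====
-- A raises IndexError on the empty list (prefix_sums[0]); B raises there too.
def Pre_prefix_sums_to_suffix_sums (prefix_sums : List Int) : Prop := prefix_sums ≠ []
instance (prefix_sums : List Int) : Decidable (Pre_prefix_sums_to_suffix_sums prefix_sums) := by unfold Pre_prefix_sums_to_suffix_sums; infer_instance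
def pvWitness_prefix_sums_to_suffix_sums : List Int := [3, 7, 12]

def Spec_prefix_sums_to_suffix_sums (prefix_sums : List Int) (out : List Int) : Prop := out = prefix_sums_to_suffix_sums_alt prefix_sums
instance (prefix_sums : List Int) (out : List Int) : Decidable (Spec_prefix_sums_to_suffix_sums prefix_sums out) := by unfold Spec_prefix_sums_to_suffix_sums; infer_instance

-- ===== CLAIM (what is proved, stated in full; the proofs are below) =====
def Claim_equal_prefix_sums_to_suffix_sums : Prop := ∀ (prefix_sums : List Int), Dom_prefix_sums_to_suffix_sums prefix_sums → Pre_prefix_sums_to_suffix_sums prefix_sums → Spec_prefix_sums_to_suffix_sums prefix_sums (prefix_sums_to_suffix_sums prefix_sums)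

-- ===== LEMMAS AND PROOFS =====

-- consecutive differences of (prev :: l): A's `arr` is h :: diffsFrom h t
def diffsFrom : Int → List Int → List Int
  | _, [] => []
  | prev, x :: xs => (x - prev) :: diffsFrom x xs

-- running prefix sums with offset s: the second component of A's second fold
def pre : Int → List Int → List Int
  | _, [] => []
  | s, x :: xs => (s + x) :: pre (s + x) xs

-- suffix sums of a list: element i is the sum of l[i:]
def sufSums : List Int → List Int
  | [] => []
  | x :: xs => (x + xs.sum) :: sufSums xs

theorem map_range_diffs (t : List Int) (h : Int) :
    (List.range t.length).map
      (fun i => (h :: t).getD (i + 1) 0 - (h :: t).getD i 0) = diffsFrom h t := by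
  induction t generalizing h with
  | nil => simp [diffsFrom]
  | cons x xs ih =>
    simp only [List.length_cons, List.range_succ_eq_map, List.map_cons, List.map_map]
    refine congrArg₂ _ (by simp) ?_
    rw [← ih x]
    exact List.map_congr_left (fun i _ => by simp [List.getD])

theorem foldl2_eq (l : List Int) (s : Int) (acc : List Int) :
    l.foldl (fun (st : Int × List Int) x => (st.1 + x, st.2 ++ [st.1 + x])) (s, acc)
      = (s + l.sum, acc ++ pre s l) := by
  induction l generalizing s acc with
  | nil => simp [pre]
  | cons x xs ih => simp [pre, ih]; ring

theorem pre_append (a b : List Int) (s : Int) :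
    pre s (a ++ b) = pre s a ++ pre (s + a.sum) b := by
  induction a generalizing s with
  | nil => simp [pre]
  | cons x xs ih => simp [pre, ih]; ring_nf

theorem pre_reverse_reverse (l : List Int) :
    (pre 0 l.reverse).reverse = sufSums l := by
  induction l with
  | nil => simp [pre, sufSums]
  | cons x xs ih =>
    simp only [List.reverse_cons, pre_append, sufSums, List.reverse_append, pre]
    simp [ih]; ring

theorem sufSums_diffs (t : List Int) (h : Int) :
    sufSums (h :: diffsFrom h t)
      = t.getLastD h :: ((h :: t).dropLast).map (fun x => t.getLastD h - x) := by
  induction t generalizing h with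
  | nil => simp [diffsFrom, sufSums]
  | cons x xs ih =>
    have h12 := List.cons.injEq .. ▸ ih x
    simp only [diffsFrom, sufSums, List.getLastD_cons, List.dropLast_cons₂,
      List.map_cons, List.sum_cons] at h12 ⊢
    refine congrArg₂ _ (by omega) (congrArg₂ _ (by omega) ?_)
    exact h12.2

-- ===== VERDICT (by name: the statement is the Claim_ definition above) =====
theorem prefix_sums_to_suffix_sums_spec : Claim_equal_prefix_sums_to_suffix_sums := by
  intro p _ hpre
  unfold Spec_prefix_sums_to_suffix_sums
  match p with
  | [] => exact absurd rfl hpre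
  | h :: t =>
    show prefix_sums_to_suffix_sums (h :: t) = _
    unfold prefix_sums_to_suffix_sums prefix_sums_to_suffix_sums_alt
    simp only [List.length_cons, Nat.add_sub_cancel,
      PySem.List.foldl_append_singleton_eq_map, List.getLast?_cons,
      List.singleton_append, ← List.getLastD_eq_getLast?]
    rw [map_range_diffs, foldl2_eq]
    simp only [List.nil_append]
    rw [pre_reverse_reverse, sufSums_diffs]
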